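-- pv_equiv track=rewrite | github.com/PostHog/viaduck | viaduck/main.py | _group_by_cursor
-- ===== SOURCE A (Python) =====
-- def _group_by_cursor(
--     cursors: dict[str, int],
--     all_dest_ids: list[str],
-- ) -> dict[int, list[str]]:
--     """Group destination IDs by their last_snapshot_id.
--
--     Returns a dict mapping snapshot_id -> [destination_ids at that snapshot].
--     Destinations not in cursors are treated as snapshot_id=0.
--     """
--     groups: dict[int, list[str]] = {}
--     for did in all_dest_ids:
--         snap = cursors.get(did, 0)
--         groups.setdefault(snap, []).append(did)
--     return groups
-- ===== SOURCE B (Python) =====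
-- def _group_by_cursor(
--     cursors: dict[str, int],
--     all_dest_ids: list[str],
-- ) -> dict[int, list[str]]:
--     """Group destination IDs by their last_snapshot_id.
--
--     Two-pass decomposition: first collect the distinct snapshot ids in
--     first-appearance order, then build each group with one filter pass.
--     """
--     snaps = list(dict.fromkeys(cursors.get(d, 0) for d in all_dest_ids))
--     return {s: [d for d in all_dest_ids if cursors.get(d, 0) == s] for s in snaps}
-- ===== Notes on version B (the rewrite author's own statement) =====
-- stated objective: alternative
-- what changed: Replaces the single-pass setdefault/append hash-bucketing loop with a two-pass decomposition: an ordered dedup of the snapshot keys followed by a dict comprehension that builds each group with a filter pass over the ids.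
import Mathlib
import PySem

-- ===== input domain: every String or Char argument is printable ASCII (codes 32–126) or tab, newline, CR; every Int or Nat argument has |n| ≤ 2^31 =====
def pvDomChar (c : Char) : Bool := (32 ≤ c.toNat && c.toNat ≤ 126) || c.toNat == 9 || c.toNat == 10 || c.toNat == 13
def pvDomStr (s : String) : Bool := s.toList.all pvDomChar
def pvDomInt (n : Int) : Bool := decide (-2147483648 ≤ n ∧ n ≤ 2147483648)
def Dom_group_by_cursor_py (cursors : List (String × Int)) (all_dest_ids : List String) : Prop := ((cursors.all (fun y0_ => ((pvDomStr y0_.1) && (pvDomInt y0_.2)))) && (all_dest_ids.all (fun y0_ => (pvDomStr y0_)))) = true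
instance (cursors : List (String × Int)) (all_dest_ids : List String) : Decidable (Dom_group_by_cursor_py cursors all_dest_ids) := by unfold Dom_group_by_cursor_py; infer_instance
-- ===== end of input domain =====

-- B replaces A's single-pass setdefault/append bucketing by an ordered dedup of the
-- snapshot keys followed by one filter pass per key (alternative decomposition, same result).


-- ===== PORT A =====
-- Transliteration of A: groups = {}; for did in all_dest_ids:
--   snap = cursors.get(did, 0); groups.setdefault(snap, []).append(did)  (= modify snap [] (· ++ [did]))
def group_by_cursor_py (cursors : List (String × Int)) (all_dest_ids : List String) : List (Int × List String) :=
  (all_dest_ids.foldl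
    (fun groups did =>
      groups.modify ((PySem.Dict.ofList cursors).getD did 0) [] (fun l => l ++ [did]))
    (PySem.Dict.empty : PySem.Dict Int (List String))).items

-- ===== PORT B =====
-- cursors.get(d, 0)
def pvKey (cursors : List (String × Int)) (d : String) : Int :=
  (PySem.Dict.ofList cursors).getD d 0

-- Transliteration of B: snaps = list(dict.fromkeys(key(d) for d)) = PySem.List.dedup;
-- the dict comprehension over the distinct snaps, in order, is the map below.
def group_by_cursor_py_alt (cursors : List (String × Int)) (all_dest_ids : List String) : List (Int × List String) :=
  (PySem.List.dedup (all_dest_ids.map (pvKey cursors))).map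
    (fun s => (s, all_dest_ids.filter (fun d => pvKey cursors d == s)))

-- ===== PRECONDITION & SPEC =====
def Spec_group_by_cursor_py (cursors : List (String × Int)) (all_dest_ids : List String) (out : List (Int × List String)) : Prop := out = group_by_cursor_py_alt cursors all_dest_ids
instance (cursors : List (String × Int)) (all_dest_ids : List String) (out : List (Int × List String)) : Decidable (Spec_group_by_cursor_py cursors all_dest_ids out) := by unfold Spec_group_by_cursor_py; infer_instance

-- ===== CLAIM (what is proved, stated in full; the proofs are below) =====
def Claim_equal_group_by_cursor_py : Prop := ∀ (cursors : List (String × Int)) (all_dest_ids : List String), Dom_group_by_cursor_py cursors all_dest_ids → Spec_group_by_cursor_py cursors all_dest_ids (group_by_cursor_py cursors all_dest_ids)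

-- ===== LEMMAS AND PROOFS =====

-- A's fold, abbreviated
theorem gbc_dict_eq (cursors : List (String × Int)) (ids : List String) :
    ids.foldl
      (fun (groups : PySem.Dict Int (List String)) did =>
        groups.modify (pvKey cursors did) [] (fun l => l ++ [did]))
      PySem.Dict.empty
    = (ids.map (fun d => (pvKey cursors d, d))).foldl
        (fun (groups : PySem.Dict Int (List String)) p =>
          groups.modify p.1 [] (fun l => l ++ [p.2]))
        PySem.Dict.empty := by
  rw [List.foldl_map]

theorem group_by_cursor_py_spec' (cursors : List (String × Int)) (ids : List String) :
    group_by_cursor_py cursors ids = group_by_cursor_py_alt cursors ids := by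
  unfold group_by_cursor_py group_by_cursor_py_alt
  have hfold := gbc_dict_eq cursors ids
  show (ids.foldl
      (fun (groups : PySem.Dict Int (List String)) did =>
        groups.modify (pvKey cursors did) [] (fun l => l ++ [did]))
      PySem.Dict.empty).items = _
  set D := ids.foldl
      (fun (groups : PySem.Dict Int (List String)) did =>
        groups.modify (pvKey cursors did) [] (fun l => l ++ [did]))
      PySem.Dict.empty with hD
  -- keys of D are the ordered dedup of the mapped keys
  have hkeys : D.keys = PySem.List.dedup (ids.map (pvKey cursors)) := by
    rw [hD]
    rw [PySem.Dict.keys_foldl_modify_key ids (pvKey cursors) [] (fun _ did => fun l => l ++ [did]) PySem.Dict.empty]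
    simp [PySem.Dict.keys_empty, PySem.Set.update, PySem.List.dedup_eq_ofList, PySem.Set.ofList]
  have hnodup : D.keys.Nodup := by
    rw [hkeys]; exact PySem.List.nodup_dedup _
  -- each entry is the filter of ids with that key
  have hget : ∀ s, D.getD s [] = ids.filter (fun d => pvKey cursors d == s) := by
    intro s
    rw [hD, gbc_dict_eq]
    rw [PySem.Dict.getD_foldl_modify_append]
    simp [PySem.Dict.getD_empty, List.filter_map, Function.comp_def]
  rw [PySem.Dict.items_eq_map_keys D hnodup []]
  rw [hkeys]
  exact List.map_congr_left (fun s _ => by rw [hget s])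

-- ===== VERDICT (by name: the statement is the Claim_ definition above) =====
theorem group_by_cursor_py_spec : Claim_equal_group_by_cursor_py := by
  intro cursors ids _
  unfold Spec_group_by_cursor_py
  exact group_by_cursor_py_spec' cursors ids
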